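-- pv_equiv track=rewrite | github.com/priyanshishukla-vibecoder/igna_agent_poc | integrations/scraper_support.py | infer_condition_from_text
-- ===== SOURCE A (Python) =====
-- NON_NEW_CONDITION_KEYWORDS = {
--     "renewed",
--     "renewed premium",
--     "refurbished",
--     "open box",
--     "used",
--     "pre-owned",
--     "pre owned",
--     "excellent",
--     "very good",
--     "good",
--     "fair",
--     "mint",
--     "sold out",
-- }
--
-- EXPLICIT_NEW_KEYWORDS = {
--     "brand new",
--     "factory sealed",
--     "new sealed",
--     "new",
-- }
--
-- def normalize_condition_text(text: str | None) -> str: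
--     return " ".join(str(text or "").lower().split())
--
-- def infer_condition_from_text(title: str | None, condition: str | None = None) -> str:
--     """
--     Normalizes the condition using both the scraped condition and title text.
--     This helps catch listings that are mislabeled as "New" but say "Renewed" in the title.
--     """
--     title_text = normalize_condition_text(title)
--     condition_text = normalize_condition_text(condition)
--     combined = f"{title_text} {condition_text}".strip()
--
--     if any(keyword in combined for keyword in NON_NEW_CONDITION_KEYWORDS):
--         if "renewed premium" in combined:
--             return "Renewed Premium"
--         if "renewed" in combined:
--             return "Renewed"
--         if "refurbished" in combined:
--             return "Refurbished"
--         if "open box" in combined: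
--             return "Open Box"
--         if "pre-owned" in combined or "pre owned" in combined:
--             return "Pre-Owned"
--         if "used" in combined:
--             return "Used"
--         if "sold out" in combined:
--             return "Unavailable"
--         if "mint" in combined:
--             return "Used"
--         if "excellent" in combined or "very good" in combined or "good" in combined or "fair" in combined:
--             return "Used"
--
--     if any(keyword in combined for keyword in EXPLICIT_NEW_KEYWORDS):
--         return "New"
--
--     if condition_text:
--         return condition
--
--     return "Not specified"
-- ===== SOURCE B (Python) =====
-- # B: single left-to-right scan of the combined text, matching all keywords at each
-- # position and keeping the best (lowest) priority seen; label table maps priority to result.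
-- _KEYWORDS = [
--     ("renewed premium", 0), ("renewed", 1), ("refurbished", 2), ("open box", 3),
--     ("pre-owned", 4), ("pre owned", 4), ("used", 5), ("sold out", 6), ("mint", 7),
--     ("excellent", 8), ("very good", 8), ("good", 8), ("fair", 8),
--     ("brand new", 9), ("factory sealed", 9), ("new sealed", 9), ("new", 9),
-- ]
-- _LABELS = ["Renewed Premium", "Renewed", "Refurbished", "Open Box", "Pre-Owned",
--            "Used", "Unavailable", "Used", "Used", "New"]
--
-- def _norm(text):
--     return " ".join(str(text or "").lower().split())
--
-- def infer_condition_from_text(title, condition=None):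
--     combined = f"{_norm(title)} {_norm(condition)}".strip()
--     best = len(_LABELS)
--     for i in range(len(combined)):
--         for kw, p in _KEYWORDS:
--             if p < best and combined.startswith(kw, i):
--                 best = p
--     if best < len(_LABELS):
--         return _LABELS[best]
--     return condition if _norm(condition) else "Not specified"
-- ===== Notes on version B (the rewrite author's own statement) =====
-- stated objective: alternative
-- what changed: Instead of testing each keyword separately with substring searches in a gated if-chain, B makes a single left-to-right scan over the combined text, matching every keyword at each position and keeping the lowest priority seen, then maps that priority through a label table.
import Mathlib
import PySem

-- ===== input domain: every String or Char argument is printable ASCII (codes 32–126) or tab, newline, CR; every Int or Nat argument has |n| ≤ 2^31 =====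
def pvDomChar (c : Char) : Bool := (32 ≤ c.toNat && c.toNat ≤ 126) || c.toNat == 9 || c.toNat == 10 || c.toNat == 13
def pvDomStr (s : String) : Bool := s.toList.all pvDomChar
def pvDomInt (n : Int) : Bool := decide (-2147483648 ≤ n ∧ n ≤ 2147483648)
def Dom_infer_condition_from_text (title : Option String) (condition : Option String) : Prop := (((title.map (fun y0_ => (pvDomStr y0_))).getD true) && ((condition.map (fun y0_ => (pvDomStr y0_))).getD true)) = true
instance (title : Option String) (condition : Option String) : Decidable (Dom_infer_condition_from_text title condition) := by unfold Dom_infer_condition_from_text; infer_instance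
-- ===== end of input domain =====

-- B replaces A's per-keyword substring tests by a single left-to-right scan of the combined
-- text that matches every keyword at each position and keeps the lowest priority seen.

-- ===== PORT A =====
-- " ".join(str(text or "").lower().split())
def normalize_condition_text (text : Option String) : String :=
  PySem.Str.join " " (PySem.Str.split₀ (PySem.Str.lower (text.getD "")))

-- Python set literals: iteration order is irrelevant here (only `any` is taken), listed in source order.
def NON_NEW_CONDITION_KEYWORDS : List String :=
  ["renewed", "renewed premium", "refurbished", "open box", "used", "pre-owned", "pre owned",
   "excellent", "very good", "good", "fair", "mint", "sold out"]

def EXPLICIT_NEW_KEYWORDS : List String :=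
  ["brand new", "factory sealed", "new sealed", "new"]

-- every branch of the gated if-chain returns; `rest` is the code after the gated block,
-- reached both when the gate is false and when no keyword of the inner chain matched
def infer_condition_from_text (title : Option String) (condition : Option String) : String :=
  let title_text := normalize_condition_text title
  let condition_text := normalize_condition_text condition
  let combined := PySem.Str.strip (PySem.Str.join " " [title_text, condition_text])
  let rest :=
    if EXPLICIT_NEW_KEYWORDS.any (fun kw => PySem.Str.isIn kw combined) then "New"
    else if condition_text ≠ "" then condition.getD ""
    else "Not specified"
  if NON_NEW_CONDITION_KEYWORDS.any (fun kw => PySem.Str.isIn kw combined) then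
    if PySem.Str.isIn "renewed premium" combined then "Renewed Premium"
    else if PySem.Str.isIn "renewed" combined then "Renewed"
    else if PySem.Str.isIn "refurbished" combined then "Refurbished"
    else if PySem.Str.isIn "open box" combined then "Open Box"
    else if PySem.Str.isIn "pre-owned" combined || PySem.Str.isIn "pre owned" combined then "Pre-Owned"
    else if PySem.Str.isIn "used" combined then "Used"
    else if PySem.Str.isIn "sold out" combined then "Unavailable"
    else if PySem.Str.isIn "mint" combined then "Used"
    else if PySem.Str.isIn "excellent" combined || (PySem.Str.isIn "very good" combined
            || (PySem.Str.isIn "good" combined || PySem.Str.isIn "fair" combined)) then "Used"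
    else rest
  else rest

-- ===== PORT B =====
def pvNormB (text : Option String) : String :=
  PySem.Str.join " " (PySem.Str.split₀ (PySem.Str.lower (text.getD "")))

def pvKeywords : List (String × Nat) :=
  [("renewed premium", 0), ("renewed", 1), ("refurbished", 2), ("open box", 3),
   ("pre-owned", 4), ("pre owned", 4), ("used", 5), ("sold out", 6), ("mint", 7),
   ("excellent", 8), ("very good", 8), ("good", 8), ("fair", 8),
   ("brand new", 9), ("factory sealed", 9), ("new sealed", 9), ("new", 9)]

def pvLabels : List String :=
  ["Renewed Premium", "Renewed", "Refurbished", "Open Box", "Pre-Owned",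
   "Used", "Unavailable", "Used", "Used", "New"]

-- Python's combined.startswith(kw, i) with 0 ≤ i is exactly: kw is a prefix of combined[i:]
def infer_condition_from_text_alt (title : Option String) (condition : Option String) : String :=
  let combined := PySem.Str.strip (PySem.Str.join " " [pvNormB title, pvNormB condition])
  let cs := combined.toList
  let best := (List.range cs.length).foldl
    (fun b i => pvKeywords.foldl
      (fun b kp => if kp.2 < b && PySem.Chars.startswith (cs.drop i) kp.1.toList then kp.2 else b) b)
    pvLabels.length
  if best < pvLabels.length then pvLabels.getD best ""
  else if pvNormB condition ≠ "" then condition.getD "" else "Not specified"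

-- ===== PRECONDITION & SPEC =====
def Spec_infer_condition_from_text (title : Option String) (condition : Option String) (out : String) : Prop := out = infer_condition_from_text_alt title condition
instance (title : Option String) (condition : Option String) (out : String) : Decidable (Spec_infer_condition_from_text title condition out) := by unfold Spec_infer_condition_from_text; infer_instance

-- ===== CLAIM =====
def Claim_equal_infer_condition_from_text : Prop := ∀ (title : Option String) (condition : Option String), Dom_infer_condition_from_text title condition → Spec_infer_condition_from_text title condition (infer_condition_from_text title condition)

-- ===== LEMMAS AND PROOFS =====

theorem pvNormB_eq (t : Option String) : pvNormB t = normalize_condition_text t := rfl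

theorem pv_step_min (p b : Nat) (m : Bool) :
    (if p < b && m then p else b) = (if m then min p b else b) := by
  cases m <;> simp [Nat.min_def] <;> split_ifs <;> omega

set_option maxHeartbeats 1000000 in
theorem pv_flatten (cs : List Char) :
    (List.range cs.length).foldl
      (fun b i => pvKeywords.foldl
        (fun b kp => if kp.2 < b && PySem.Chars.startswith (cs.drop i) kp.1.toList then kp.2 else b) b)
      pvLabels.length
    = ((List.range cs.length).flatMap (fun i => pvKeywords.map (fun kp => (i, kp)))).foldl
        (fun b x => if PySem.Chars.startswith (cs.drop x.1) x.2.1.toList then min x.2.2 b else b)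
        pvLabels.length := by
  rw [List.foldl_flatMap]
  simp only [List.foldl_map, pv_step_min]

theorem pv_exists_pos_iff (cs kw : List Char) (hkw : kw ≠ []) :
    (∃ i, i ∈ List.range cs.length ∧ PySem.Chars.startswith (cs.drop i) kw = true) ↔
      PySem.Chars.isIn kw cs = true := by
  rw [← PySem.Chars.exists_prefix_drop_iff_isIn]
  constructor
  · rintro ⟨i, _, hs⟩
    exact ⟨i, (PySem.Chars.startswith_iff _ _).mp hs⟩
  · rintro ⟨j, hj⟩
    by_cases hlt : j < cs.length
    · exact ⟨j, List.mem_range.mpr hlt, (PySem.Chars.startswith_iff _ _).mpr hj⟩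
    · exfalso
      have h0 : cs.drop j = [] := List.drop_eq_nil_of_le (by omega)
      rw [h0] at hj
      exact hkw (List.prefix_nil.mp hj)

def pvOcc (cs : List Char) : Nat → Bool
  | 0 => PySem.Chars.isIn "renewed premium".toList cs
  | 1 => PySem.Chars.isIn "renewed".toList cs
  | 2 => PySem.Chars.isIn "refurbished".toList cs
  | 3 => PySem.Chars.isIn "open box".toList cs
  | 4 => PySem.Chars.isIn "pre-owned".toList cs || PySem.Chars.isIn "pre owned".toList cs
  | 5 => PySem.Chars.isIn "used".toList cs
  | 6 => PySem.Chars.isIn "sold out".toList cs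
  | 7 => PySem.Chars.isIn "mint".toList cs
  | 8 => PySem.Chars.isIn "excellent".toList cs || PySem.Chars.isIn "very good".toList cs
         || PySem.Chars.isIn "good".toList cs || PySem.Chars.isIn "fair".toList cs
  | 9 => PySem.Chars.isIn "brand new".toList cs || PySem.Chars.isIn "factory sealed".toList cs
         || PySem.Chars.isIn "new sealed".toList cs || PySem.Chars.isIn "new".toList cs
  | _ => false

theorem pv_kw_mem (kp : String × Nat) (hkp : kp ∈ pvKeywords) :
    kp.1.toList ≠ [] ∧ kp.2 < 10 ∧ (PySem.Chars.isIn kp.1.toList cs = true → pvOcc cs kp.2 = true) := by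
  simp only [pvKeywords, List.mem_cons, List.not_mem_nil, or_false] at hkp
  rcases hkp with rfl|rfl|rfl|rfl|rfl|rfl|rfl|rfl|rfl|rfl|rfl|rfl|rfl|rfl|rfl|rfl|rfl <;>
    refine ⟨by decide, by decide, fun h => ?_⟩ <;> (simp at h; simp [pvOcc, h])

set_option maxHeartbeats 1000000 in
theorem pv_occ_kw (cs : List Char) (p : Nat) (h : pvOcc cs p = true) :
    ∃ kp ∈ pvKeywords, kp.2 = p ∧ PySem.Chars.isIn kp.1.toList cs = true := by
  match p, h with
  | 0, h => exact ⟨("renewed premium", 0), by simp [pvKeywords], rfl, h⟩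
  | 1, h => exact ⟨("renewed", 1), by simp [pvKeywords], rfl, h⟩
  | 2, h => exact ⟨("refurbished", 2), by simp [pvKeywords], rfl, h⟩
  | 3, h => exact ⟨("open box", 3), by simp [pvKeywords], rfl, h⟩
  | 4, h =>
    rcases Bool.or_eq_true_iff.mp h with h | h
    · exact ⟨("pre-owned", 4), by simp [pvKeywords], rfl, h⟩
    · exact ⟨("pre owned", 4), by simp [pvKeywords], rfl, h⟩
  | 5, h => exact ⟨("used", 5), by simp [pvKeywords], rfl, h⟩
  | 6, h => exact ⟨("sold out", 6), by simp [pvKeywords], rfl, h⟩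
  | 7, h => exact ⟨("mint", 7), by simp [pvKeywords], rfl, h⟩
  | 8, h =>
    rcases Bool.or_eq_true_iff.mp h with h | h
    · rcases Bool.or_eq_true_iff.mp h with h | h
      · rcases Bool.or_eq_true_iff.mp h with h | h
        · exact ⟨("excellent", 8), by simp [pvKeywords], rfl, h⟩
        · exact ⟨("very good", 8), by simp [pvKeywords], rfl, h⟩
      · exact ⟨("good", 8), by simp [pvKeywords], rfl, h⟩
    · exact ⟨("fair", 8), by simp [pvKeywords], rfl, h⟩
  | 9, h =>
    rcases Bool.or_eq_true_iff.mp h with h | h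
    · rcases Bool.or_eq_true_iff.mp h with h | h
      · rcases Bool.or_eq_true_iff.mp h with h | h
        · exact ⟨("brand new", 9), by simp [pvKeywords], rfl, h⟩
        · exact ⟨("factory sealed", 9), by simp [pvKeywords], rfl, h⟩
      · exact ⟨("new sealed", 9), by simp [pvKeywords], rfl, h⟩
    · exact ⟨("new", 9), by simp [pvKeywords], rfl, h⟩

theorem pv_fold_le {α : Type} (m : α → Bool) (f : α → Nat) (L : List α) :
    ∀ b : Nat, L.foldl (fun b x => if m x then min (f x) b else b) b ≤ b := by
  induction L with
  | nil => simp
  | cons y L ih =>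
    intro b
    simp only [List.foldl_cons]
    refine le_trans (ih _) ?_
    split <;> omega

theorem pv_fold_le_matched {α : Type} (m : α → Bool) (f : α → Nat) (L : List α)
    (x : α) (hx : x ∈ L) (hm : m x = true) :
    ∀ b : Nat, L.foldl (fun b x => if m x then min (f x) b else b) b ≤ f x := by
  induction L with
  | nil => simp at hx
  | cons y L ih =>
    intro b
    simp only [List.foldl_cons]
    rcases List.mem_cons.mp hx with h | h
    · subst h
      refine le_trans (pv_fold_le m f L _) ?_
      simp [hm]
    · exact ih h _

theorem pv_fold_mem {α : Type} (m : α → Bool) (f : α → Nat) (L : List α) :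
    ∀ b : Nat, L.foldl (fun b x => if m x then min (f x) b else b) b = b ∨
      ∃ x ∈ L, m x = true ∧ f x = L.foldl (fun b x => if m x then min (f x) b else b) b := by
  induction L with
  | nil => intro b; left; rfl
  | cons y L ih =>
    intro b
    simp only [List.foldl_cons]
    rcases ih (if m y then min (f y) b else b) with h | ⟨x, hx, hm, hf⟩
    · by_cases hy : m y = true
      · rcases Nat.le_total (f y) b with hle | hle
        · right
          refine ⟨y, List.mem_cons_self, hy, ?_⟩
          rw [h]; simp [hy, Nat.min_def]; omega
        · left; rw [h]; simp [hy, Nat.min_def]; omega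
      · left; rw [h]; simp [hy]
    · right; exact ⟨x, List.mem_cons_of_mem _ hx, hm, hf⟩



theorem pv_matched_iff_occ (cs : List Char) (p : Nat) :
    (∃ x ∈ (List.range cs.length).flatMap (fun i => pvKeywords.map (fun kp => (i, kp))),
        PySem.Chars.startswith (cs.drop x.1) x.2.1.toList = true ∧ x.2.2 = p) ↔
      pvOcc cs p = true := by
  constructor
  · rintro ⟨x, hmem, hs, hp⟩
    simp only [List.mem_flatMap, List.mem_map] at hmem
    obtain ⟨i, hi, kp, hkp, rfl⟩ := hmem
    obtain ⟨hne, -, himp⟩ := @pv_kw_mem cs kp hkp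
    subst hp
    exact himp ((pv_exists_pos_iff cs kp.1.toList hne).mp ⟨i, hi, hs⟩)
  · intro h
    obtain ⟨kp, hkp, hp, hin⟩ := pv_occ_kw cs p h
    obtain ⟨hne, -, -⟩ := @pv_kw_mem cs kp hkp
    obtain ⟨i, hi, hs⟩ := (pv_exists_pos_iff cs kp.1.toList hne).mpr hin
    exact ⟨(i, kp), by simp only [List.mem_flatMap, List.mem_map]; exact ⟨i, hi, kp, hkp, rfl⟩, hs, hp⟩

theorem pv_best_eq (cs : List Char) (k : Nat) (hk : k ≤ 10)
    (hbefore : ∀ j < k, pvOcc cs j = false) (hocc : k < 10 → pvOcc cs k = true) :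
    ((List.range cs.length).flatMap (fun i => pvKeywords.map (fun kp => (i, kp)))).foldl
        (fun b x => if PySem.Chars.startswith (cs.drop x.1) x.2.1.toList then min x.2.2 b else b)
        pvLabels.length = k := by
  have hlab : pvLabels.length = 10 := by simp [pvLabels]
  set L := (List.range cs.length).flatMap (fun i => pvKeywords.map (fun kp => (i, kp))) with hL
  set m : Nat × (String × Nat) → Bool := fun x => PySem.Chars.startswith (cs.drop x.1) x.2.1.toList with hm
  set f : Nat × (String × Nat) → Nat := fun x => x.2.2 with hf
  set r := L.foldl (fun b x => if m x then min (f x) b else b) pvLabels.length with hr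
  have hge : k ≤ r := by
    rcases pv_fold_mem m f L pvLabels.length with h | ⟨x, hx, hmx, hfx⟩
    · rw [hr, h, hlab]; omega
    · have hflag : pvOcc cs (f x) = true :=
        (pv_matched_iff_occ cs (f x)).mp ⟨x, hx, hmx, rfl⟩
      by_contra hcon
      have hlt : f x < k := by omega
      rw [hbefore (f x) hlt] at hflag
      exact Bool.false_ne_true hflag
  rcases Nat.lt_or_ge k 10 with hk10 | hk10
  · obtain ⟨x, hx, hmx, hfx⟩ := (pv_matched_iff_occ cs k).mpr (hocc hk10)
    have hle : r ≤ f x := pv_fold_le_matched m f L x hx hmx pvLabels.length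
    rw [hf] at hle
    simp only [hfx] at hle
    omega
  · have hle : r ≤ 10 := hlab ▸ pv_fold_le m f L pvLabels.length
    omega

set_option maxHeartbeats 2000000 in
theorem pv_core (C ct : String) (condition : Option String) :
    (if NON_NEW_CONDITION_KEYWORDS.any (fun kw => PySem.Str.isIn kw C) then
      if PySem.Str.isIn "renewed premium" C then "Renewed Premium"
      else if PySem.Str.isIn "renewed" C then "Renewed"
      else if PySem.Str.isIn "refurbished" C then "Refurbished"
      else if PySem.Str.isIn "open box" C then "Open Box"
      else if PySem.Str.isIn "pre-owned" C || PySem.Str.isIn "pre owned" C then "Pre-Owned"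
      else if PySem.Str.isIn "used" C then "Used"
      else if PySem.Str.isIn "sold out" C then "Unavailable"
      else if PySem.Str.isIn "mint" C then "Used"
      else if PySem.Str.isIn "excellent" C || (PySem.Str.isIn "very good" C
              || (PySem.Str.isIn "good" C || PySem.Str.isIn "fair" C)) then "Used"
      else
        if EXPLICIT_NEW_KEYWORDS.any (fun kw => PySem.Str.isIn kw C) then "New"
        else if ct ≠ "" then condition.getD ""
        else "Not specified"
    else
      if EXPLICIT_NEW_KEYWORDS.any (fun kw => PySem.Str.isIn kw C) then "New"
      else if ct ≠ "" then condition.getD ""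
      else "Not specified")
    =
    (if ((List.range C.toList.length).foldl
          (fun b i => pvKeywords.foldl
            (fun b kp => if kp.2 < b && PySem.Chars.startswith (C.toList.drop i) kp.1.toList then kp.2 else b) b)
          pvLabels.length) < pvLabels.length then
        pvLabels.getD ((List.range C.toList.length).foldl
          (fun b i => pvKeywords.foldl
            (fun b kp => if kp.2 < b && PySem.Chars.startswith (C.toList.drop i) kp.1.toList then kp.2 else b) b)
          pvLabels.length) ""
      else if ct ≠ "" then condition.getD "" else "Not specified") := by
  rw [pv_flatten C.toList]
  by_cases h0 : pvOcc C.toList 0 = true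
  · rw [pv_best_eq C.toList 0 (by omega) (by intro j hj; interval_cases j <;> assumption) (fun _ => h0)]
    simp only [pvOcc] at h0
    simp_all [NON_NEW_CONDITION_KEYWORDS, EXPLICIT_NEW_KEYWORDS, pvLabels]
  rw [Bool.not_eq_true] at h0
  by_cases h1 : pvOcc C.toList 1 = true
  · rw [pv_best_eq C.toList 1 (by omega) (by intro j hj; interval_cases j <;> assumption) (fun _ => h1)]
    simp only [pvOcc] at h0 h1
    simp_all [NON_NEW_CONDITION_KEYWORDS, EXPLICIT_NEW_KEYWORDS, pvLabels]
  rw [Bool.not_eq_true] at h1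
  by_cases h2 : pvOcc C.toList 2 = true
  · rw [pv_best_eq C.toList 2 (by omega) (by intro j hj; interval_cases j <;> assumption) (fun _ => h2)]
    simp only [pvOcc] at h0 h1 h2
    simp_all [NON_NEW_CONDITION_KEYWORDS, EXPLICIT_NEW_KEYWORDS, pvLabels]
  rw [Bool.not_eq_true] at h2
  by_cases h3 : pvOcc C.toList 3 = true
  · rw [pv_best_eq C.toList 3 (by omega) (by intro j hj; interval_cases j <;> assumption) (fun _ => h3)]
    simp only [pvOcc] at h0 h1 h2 h3
    simp_all [NON_NEW_CONDITION_KEYWORDS, EXPLICIT_NEW_KEYWORDS, pvLabels]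
  rw [Bool.not_eq_true] at h3
  by_cases h4 : pvOcc C.toList 4 = true
  · rw [pv_best_eq C.toList 4 (by omega) (by intro j hj; interval_cases j <;> assumption) (fun _ => h4)]
    simp only [pvOcc] at h0 h1 h2 h3 h4
    simp only [Bool.or_eq_true] at h4
    rcases h4 with h|h <;>
      simp_all [NON_NEW_CONDITION_KEYWORDS, EXPLICIT_NEW_KEYWORDS, pvLabels]
  rw [Bool.not_eq_true] at h4
  by_cases h5 : pvOcc C.toList 5 = true
  · rw [pv_best_eq C.toList 5 (by omega) (by intro j hj; interval_cases j <;> assumption) (fun _ => h5)]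
    simp only [pvOcc] at h0 h1 h2 h3 h4 h5
    simp_all [NON_NEW_CONDITION_KEYWORDS, EXPLICIT_NEW_KEYWORDS, pvLabels]
  rw [Bool.not_eq_true] at h5
  by_cases h6 : pvOcc C.toList 6 = true
  · rw [pv_best_eq C.toList 6 (by omega) (by intro j hj; interval_cases j <;> assumption) (fun _ => h6)]
    simp only [pvOcc] at h0 h1 h2 h3 h4 h5 h6
    simp_all [NON_NEW_CONDITION_KEYWORDS, EXPLICIT_NEW_KEYWORDS, pvLabels]
  rw [Bool.not_eq_true] at h6
  by_cases h7 : pvOcc C.toList 7 = true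
  · rw [pv_best_eq C.toList 7 (by omega) (by intro j hj; interval_cases j <;> assumption) (fun _ => h7)]
    simp only [pvOcc] at h0 h1 h2 h3 h4 h5 h6 h7
    simp_all [NON_NEW_CONDITION_KEYWORDS, EXPLICIT_NEW_KEYWORDS, pvLabels]
  rw [Bool.not_eq_true] at h7
  by_cases h8 : pvOcc C.toList 8 = true
  · rw [pv_best_eq C.toList 8 (by omega) (by intro j hj; interval_cases j <;> assumption) (fun _ => h8)]
    simp only [pvOcc] at h0 h1 h2 h3 h4 h5 h6 h7 h8
    simp only [Bool.or_eq_true] at h8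
    rcases h8 with ((h|h)|h)|h <;>
      simp_all [NON_NEW_CONDITION_KEYWORDS, EXPLICIT_NEW_KEYWORDS, pvLabels]
  rw [Bool.not_eq_true] at h8
  by_cases h9 : pvOcc C.toList 9 = true
  · rw [pv_best_eq C.toList 9 (by omega) (by intro j hj; interval_cases j <;> assumption) (fun _ => h9)]
    simp only [pvOcc] at h0 h1 h2 h3 h4 h5 h6 h7 h8 h9
    simp only [Bool.or_eq_true] at h9
    rcases h9 with ((h|h)|h)|h <;>
      simp_all [NON_NEW_CONDITION_KEYWORDS, EXPLICIT_NEW_KEYWORDS, pvLabels]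
  rw [Bool.not_eq_true] at h9
  rw [pv_best_eq C.toList 10 (by omega) (by intro j hj; interval_cases j <;> assumption) (by omega)]
  simp only [pvOcc] at h0 h1 h2 h3 h4 h5 h6 h7 h8 h9
  simp_all [NON_NEW_CONDITION_KEYWORDS, EXPLICIT_NEW_KEYWORDS, pvLabels]

set_option maxHeartbeats 2000000 in
theorem pv_main (title condition : Option String) :
    infer_condition_from_text title condition = infer_condition_from_text_alt title condition := by
  unfold infer_condition_from_text infer_condition_from_text_alt
  simp only [pvNormB_eq]
  exact pv_core _ _ condition


-- ===== VERDICT =====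
theorem infer_condition_from_text_spec : Claim_equal_infer_condition_from_text := by
  intro title condition _
  unfold Spec_infer_condition_from_text
  exact pv_main title condition
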